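-- pv_equiv track=rewrite | github.com/TangentialDevelopment/Web-Development-Projects | MI 250/programs/exam2.py | tableFinder
-- ===== SOURCE A (Python) =====
-- def tableFinder(n,text):
--     value = 0
--     number = 0
--     final = ""
--     for entry in text:
--         if "table" in entry:
--             value = 1
--             number += 1
--         elif "/table" in entry:
--             value = 0
--         if value and number == n:
--             final += entry
--     return final
-- ===== SOURCE B (Python) =====
-- def tableFinder(n, text):
--     blocks = {}
--     counter = 0
--     for entry in text:
--         if "table" in entry:
--             counter += 1
--         if counter >= 1:
--             blocks[counter] = blocks.get(counter, "") + entry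
--     return blocks.get(n, "")
-- ===== Notes on version B (the rewrite author's own statement) =====
-- stated objective: alternative
-- what changed: B builds a dict mapping each block number to its accumulated text in one pass and returns a single keyed lookup, instead of A's value-flag/number/final inline filtering (whose '/table' reset branch is dead code).
import Mathlib
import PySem

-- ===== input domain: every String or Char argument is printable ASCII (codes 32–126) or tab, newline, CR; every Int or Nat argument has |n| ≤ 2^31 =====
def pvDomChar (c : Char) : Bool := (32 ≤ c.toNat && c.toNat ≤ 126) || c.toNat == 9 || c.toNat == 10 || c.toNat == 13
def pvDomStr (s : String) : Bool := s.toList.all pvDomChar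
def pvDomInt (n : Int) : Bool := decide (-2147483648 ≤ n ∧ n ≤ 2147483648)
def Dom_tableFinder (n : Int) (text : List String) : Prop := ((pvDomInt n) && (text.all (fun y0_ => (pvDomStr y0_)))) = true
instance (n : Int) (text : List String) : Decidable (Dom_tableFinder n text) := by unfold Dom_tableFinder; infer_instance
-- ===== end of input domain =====

-- B replaces A's value-flag/number/final inline accumulation by a one-pass dict of all blocks
-- plus a single keyed lookup; same return value on every input (alternative decomposition, no speed claim).

-- ===== PORT A =====
-- one iteration of A's for-loop over state (value, number, final)
def tfStepA (n : Int) (st : Int × Int × String) (entry : String) : Int × Int × String :=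
  let value := st.1
  let number := st.2.1
  let final := st.2.2
  let vn : Int × Int :=
    if PySem.Str.isIn "table" entry then (1, number + 1)
    else if PySem.Str.isIn "/table" entry then (0, number)
    else (value, number)
  let final := if vn.1 ≠ 0 ∧ vn.2 = n then final ++ entry else final
  (vn.1, vn.2, final)

def tableFinder (n : Int) (text : List String) : String :=
  (text.foldl (tfStepA n) (0, 0, "")).2.2

-- ===== PORT B =====
-- one iteration of B's for-loop over state (counter, blocks)
def tfStepB (st : Int × PySem.Dict Int String) (entry : String) : Int × PySem.Dict Int String :=
  let counter := if PySem.Str.isIn "table" entry then st.1 + 1 else st.1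
  let blocks := if 1 ≤ counter then st.2.insert counter (st.2.getD counter "" ++ entry) else st.2
  (counter, blocks)

def tableFinder_alt (n : Int) (text : List String) : String :=
  ((text.foldl tfStepB (0, PySem.Dict.empty)).2).getD n ""

-- ===== PRECONDITION & SPEC =====
def Spec_tableFinder (n : Int) (text : List String) (out : String) : Prop := out = tableFinder_alt n text
instance (n : Int) (text : List String) (out : String) : Decidable (Spec_tableFinder n text out) := by unfold Spec_tableFinder; infer_instance

-- ===== CLAIM (what is proved, stated in full; the proofs are below) =====
def Claim_equal_tableFinder : Prop := ∀ (n : Int) (text : List String), Dom_tableFinder n text → Spec_tableFinder n text (tableFinder n text)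

-- ===== LEMMAS AND PROOFS =====

-- any string containing "/table" contains "table"
lemma isIn_table_of_slash (l : List Char)
    (h : PySem.Chars.isIn ['/', 't', 'a', 'b', 'l', 'e'] l = true) :
    PySem.Chars.isIn ['t', 'a', 'b', 'l', 'e'] l = true := by
  rw [PySem.Chars.isIn_iff_infix] at h ⊢
  exact List.IsInfix.trans (by decide) h

-- loop invariant: A's final equals B's blocks looked up at n, given the state correspondence
lemma tf_loop (n : Int) (text : List String) (value number : Int) (final : String)
    (blocks : PySem.Dict Int String)
    (h0 : 0 ≤ number)
    (h1 : value = if 1 ≤ number then (1 : Int) else 0)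
    (h2 : final = blocks.getD n "") :
    (text.foldl (tfStepA n) (value, number, final)).2.2
      = ((text.foldl tfStepB (number, blocks)).2).getD n "" := by
  induction text generalizing value number final blocks with
  | nil => simpa using h2
  | cons entry rest ih =>
    simp only [List.foldl_cons]
    by_cases ht : PySem.Chars.isIn ['t', 'a', 'b', 'l', 'e'] entry.toList = true
    · -- a new block starts: both sides move to number+1
      have hA : tfStepA n (value, number, final) entry
          = (1, number + 1, if number + 1 = n then final ++ entry else final) := by
        simp [tfStepA, ht]
      have hB : tfStepB (number, blocks) entry
          = (number + 1, blocks.insert (number + 1) (blocks.getD (number + 1) "" ++ entry)) := by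
        have h1' : (1 : Int) ≤ number + 1 := by omega
        simp [tfStepB, ht, h1']
      rw [hA, hB]
      refine ih 1 (number + 1) _ _ (by omega) (by simp [show (1:Int) ≤ number + 1 by omega]) ?_
      rw [PySem.Dict.getD_insert]
      by_cases hn : number + 1 = n
      · simp [hn, ← h2]
      · have hn' : ¬ n = number + 1 := fun h => hn h.symm
        simp [hn, hn', h2]
    · -- no "table" in entry: the "/table" branch cannot fire either
      have hs : PySem.Chars.isIn ['/', 't', 'a', 'b', 'l', 'e'] entry.toList = false := by
        cases hh : PySem.Chars.isIn ['/', 't', 'a', 'b', 'l', 'e'] entry.toList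
        · rfl
        · rw [isIn_table_of_slash entry.toList hh] at ht; exact absurd rfl ht
      have hvne : (value ≠ 0) ↔ (1 ≤ number) := by
        constructor <;> intro h
        · by_contra hc; simp [hc] at h1; exact h h1
        · simp [h] at h1; omega
      have hA : tfStepA n (value, number, final) entry
          = (value, number, if value ≠ 0 ∧ number = n then final ++ entry else final) := by
        simp [tfStepA, ht, hs]
      by_cases hc : 1 ≤ number
      · have hB : tfStepB (number, blocks) entry
            = (number, blocks.insert number (blocks.getD number "" ++ entry)) := by
          simp [tfStepB, ht, hc]
        rw [hA, hB]
        refine ih value number _ _ h0 h1 ?_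
        rw [PySem.Dict.getD_insert]
        by_cases hn : number = n
        · simp [hn, ← h2, hvne.mpr hc]
        · have hn' : ¬ n = number := fun h => hn h.symm
          simp [hn, hn', h2]
      · have hB : tfStepB (number, blocks) entry = (number, blocks) := by
          simp [tfStepB, ht, hc]
        rw [hA, hB]
        refine ih value number _ _ h0 h1 ?_
        have hv : ¬ (value ≠ 0) := fun h => hc (hvne.mp h)
        simp [hv, h2]

-- ===== VERDICT (by name: the statement is the Claim_ definition above) =====
theorem tableFinder_spec : Claim_equal_tableFinder := by
  intro n text _
  show tableFinder n text = tableFinder_alt n text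
  unfold tableFinder tableFinder_alt
  exact tf_loop n text 0 0 "" PySem.Dict.empty le_rfl (by norm_num) (by simp)
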